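-- pv_equiv track=rewrite | github.com/amitsaha/learning | Python/oddmanout.py | oddmanout
-- ===== SOURCE A (Python) =====
-- def oddmanout(arr):
--
--     # O(n) space
--     s = set()
--     sum = 0
--     # O(n)
--     for num in arr:
--         # O(1) lookup
--         if num not in s:
--             sum += num
--             s.add(num)
--         else:
--             sum -= num
--     return sum
-- ===== SOURCE B (Python) =====
-- def oddmanout(arr):
--     # Each distinct value contributes +v for its first occurrence and -v for
--     # every repeat, so the total is 2*sum(distinct values) - sum(all values).
--     return 2 * sum(set(arr)) - sum(arr)
-- ===== Notes on version B (the rewrite author's own statement) =====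
-- stated objective: simpler
-- what changed: Replaced the membership-branching accumulation loop (seen-set plus running +/- sum) by the closed form 2*sum(set(arr)) - sum(arr).
import Mathlib
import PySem

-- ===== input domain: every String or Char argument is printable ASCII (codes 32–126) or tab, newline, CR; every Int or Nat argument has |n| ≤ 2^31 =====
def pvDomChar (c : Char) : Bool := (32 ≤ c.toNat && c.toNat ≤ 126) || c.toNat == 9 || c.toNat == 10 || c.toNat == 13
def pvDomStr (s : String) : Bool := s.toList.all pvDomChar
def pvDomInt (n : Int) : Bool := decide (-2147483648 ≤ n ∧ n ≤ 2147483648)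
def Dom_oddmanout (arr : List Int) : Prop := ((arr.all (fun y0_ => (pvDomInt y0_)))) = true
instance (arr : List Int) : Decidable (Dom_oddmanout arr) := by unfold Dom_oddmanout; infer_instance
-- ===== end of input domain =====

-- B replaces A's seen-set branching loop by the closed form 2*sum(set(arr)) - sum(arr) (objective: simpler).

-- ===== PORT A =====
def oddmanoutLoop (arr : List Int) (s : PySem.Set Int) (acc : Int) : Int :=
  match arr with
  | [] => acc
  | num :: rest =>
    if ¬ PySem.Set.contains s num then
      oddmanoutLoop rest (PySem.Set.add s num) (acc + num)
    else
      oddmanoutLoop rest s (acc - num)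

def oddmanout (arr : List Int) : Int := oddmanoutLoop arr PySem.Set.empty 0

-- ===== PORT B =====
def oddmanout_alt (arr : List Int) : Int := 2 * (PySem.Set.ofList arr).sum - arr.sum

-- ===== PRECONDITION & SPEC =====
def Spec_oddmanout (arr : List Int) (out : Int) : Prop := out = oddmanout_alt arr
instance (arr : List Int) (out : Int) : Decidable (Spec_oddmanout arr out) := by unfold Spec_oddmanout; infer_instance

-- ===== CLAIM (what is proved, stated in full; the proofs are below) =====
def Claim_equal_oddmanout : Prop := ∀ (arr : List Int), Dom_oddmanout arr → Spec_oddmanout arr (oddmanout arr)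

-- ===== LEMMAS AND PROOFS =====

-- sum of a nodup list equals the Finset sum over its elements
theorem pv_sum_eq_finset (l : List Int) (h : l.Nodup) :
    l.sum = ∑ x ∈ l.toFinset, x := by
  rw [List.sum_toFinset _ h]; simp

-- A's loop computes acc + 2*(sum of elements of arr not yet seen) - sum arr
theorem pv_loop_inv (arr : List Int) :
    ∀ (s : PySem.Set Int) (acc : Int),
      oddmanoutLoop arr s acc
        = acc + 2 * (∑ x ∈ arr.toFinset \ s.toFinset, x) - arr.sum := by
  induction arr with
  | nil => intro s acc; simp [oddmanoutLoop]
  | cons num rest ih =>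
    intro s acc
    by_cases h : num ∈ s
    · rw [oddmanoutLoop]
      rw [if_neg (by simp only [not_not]; simp; exact h)]
      rw [ih]
      have hset : (num :: rest).toFinset \ s.toFinset = rest.toFinset \ s.toFinset := by
        ext x
        simp only [List.toFinset_cons, Finset.mem_sdiff, Finset.mem_insert, List.mem_toFinset]
        constructor
        · rintro ⟨hx | hx, hns⟩
          · exact absurd (hx ▸ h) hns
          · exact ⟨hx, hns⟩
        · rintro ⟨hx, hns⟩; exact ⟨Or.inr hx, hns⟩
      rw [hset, List.sum_cons]; ring
    · rw [oddmanoutLoop]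
      rw [if_pos (by simp; exact h)]
      rw [ih]
      have hadd : (PySem.Set.add s num).toFinset = insert num s.toFinset := by
        ext x
        simp [PySem.Set.mem_add, or_comm]
      have hset : (num :: rest).toFinset \ s.toFinset
          = insert num (rest.toFinset \ (PySem.Set.add s num).toFinset) := by
        rw [hadd]
        ext x
        simp only [List.toFinset_cons, Finset.mem_sdiff, Finset.mem_insert, List.mem_toFinset]
        constructor
        · rintro ⟨hx | hx, hns⟩
          · exact Or.inl hx
          · by_cases hxn : x = num
            · exact Or.inl hxn
            · exact Or.inr ⟨hx, by simp [hxn, hns]⟩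
        · rintro (hx | ⟨hx, hns⟩)
          · exact ⟨Or.inl hx, hx ▸ fun c => h c⟩
          · exact ⟨Or.inr hx, fun c => hns (by simp [c])⟩
      have hnm : num ∉ rest.toFinset \ (PySem.Set.add s num).toFinset := by
        simp [hadd]
      rw [hset, Finset.sum_insert hnm, List.sum_cons]; ring

theorem pv_ofList_toFinset (arr : List Int) :
    (PySem.Set.ofList arr).toFinset = arr.toFinset := by
  ext x
  simp [PySem.Set.mem_ofList]

-- ===== VERDICT (by name: the statement is the Claim_ definition above) =====
theorem oddmanout_spec : Claim_equal_oddmanout := by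
  intro arr _
  unfold Spec_oddmanout oddmanout oddmanout_alt
  rw [pv_loop_inv]
  rw [pv_sum_eq_finset _ (PySem.Set.nodup_ofList arr), pv_ofList_toFinset]
  have : (PySem.Set.empty : PySem.Set Int).toFinset = ∅ := rfl
  rw [this, Finset.sdiff_empty]
  ring
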